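-- pv_equiv track=rewrite | github.com/sganeshcv/NTC_Assignment | Vigenere/cryptanalysis/kasiski_test.py | setSplitSentences
-- ===== SOURCE A (Python) =====
-- def setSplitSentences(split, message):
--     split_sentenses = {}
--     for i in range(split) :
--         split_sentenses[i] = ""
--     i = 0
--     while i < len(message):
--         for j in range(0,split):
--             if i+j < len(message):
--                 split_sentenses[j] += message[i+j]
--         i += split
--     return split_sentenses
-- ===== SOURCE B (Python) =====
-- def setSplitSentences(split, message):
--     return {j: message[j::split] for j in range(split)}
-- ===== Notes on version B (the rewrite author's own statement) =====
-- stated objective: idiomatic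
-- what changed: Replaces the dict-initialisation pass plus the nested while/for character-appending loops by a single dict comprehension that builds each bucket whole with one strided slice message[j::split].
import Mathlib
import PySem

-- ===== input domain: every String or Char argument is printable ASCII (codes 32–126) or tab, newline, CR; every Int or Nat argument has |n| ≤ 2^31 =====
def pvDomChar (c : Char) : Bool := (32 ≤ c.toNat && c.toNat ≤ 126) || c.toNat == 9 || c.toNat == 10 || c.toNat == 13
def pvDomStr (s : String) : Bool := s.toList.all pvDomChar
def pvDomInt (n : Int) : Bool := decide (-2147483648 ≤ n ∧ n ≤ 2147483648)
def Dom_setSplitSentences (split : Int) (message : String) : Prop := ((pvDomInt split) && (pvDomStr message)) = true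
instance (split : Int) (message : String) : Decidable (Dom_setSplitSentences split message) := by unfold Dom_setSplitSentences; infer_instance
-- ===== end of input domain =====

-- B replaces A's nested character-appending loops by one strided slice message[j::split] per bucket
-- (idiomatic dict comprehension); return values agree on every input where A terminates.

-- ===== PORT A =====
-- inner `for j in range(0, split): if i+j < len(message): split_sentenses[j] += message[i+j]`
-- (the fall-through arms of the match are unreachable: j is always a key of the dict, and 0 ≤ i+j < len)
def pvBodyA (cs : List Char) (split : Int) (i : Int) (d : PySem.Dict Int String) : PySem.Dict Int String :=
  (PySem.List.pyRange 0 split 1).foldl (fun d j =>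
    if i + j < (cs.length : Int) then
      match d.get? j, PySem.List.pyGet? cs (i + j) with
      | some str, some c => d.insert j (str.push c)
      | _, _ => d
    else d) d

-- the `while i < len(message)` loop; fuel = len(message) suffices: with split ≥ 1 the loop runs
-- at most ceil(len/split) ≤ len times (for split ≤ 0 and non-empty message the Python never returns — outside Pre_)
def pvLoopA (cs : List Char) (split : Int) : Nat → Int → PySem.Dict Int String → PySem.Dict Int String
  | 0, _, d => d
  | fuel + 1, i, d =>
    if i < (cs.length : Int) then pvLoopA cs split fuel (i + split) (pvBodyA cs split i d) else d

def setSplitSentences (split : Int) (message : String) : List (Int × String) :=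
  let cs := message.toList
  let d0 := (PySem.List.pyRange 0 split 1).foldl (fun d i => d.insert i "") PySem.Dict.empty
  (pvLoopA cs split cs.length 0 d0).items

-- ===== PORT B =====
-- {j: message[j::split] for j in range(split)}  (the getD "" arm is unreachable: split ≠ 0 whenever the range is non-empty)
def setSplitSentences_alt (split : Int) (message : String) : List (Int × String) :=
  ((PySem.List.pyRange 0 split 1).foldl (fun d j =>
      d.insert j ((PySem.Str.slice? message (some j) none split).getD "")) PySem.Dict.empty).items

-- ===== PRECONDITION & SPEC =====
-- Pre_ excludes split ≤ 0 with a non-empty message: there A's while loop never advances i and the Python diverges.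
def Pre_setSplitSentences (split : Int) (message : String) : Prop :=
  1 ≤ split ∨ message = ""
instance (split : Int) (message : String) : Decidable (Pre_setSplitSentences split message) := by
  unfold Pre_setSplitSentences; infer_instance

def pvWitness_setSplitSentences : Int × String := (3, "hello world")

def Spec_setSplitSentences (split : Int) (message : String) (out : List (Int × String)) : Prop := out = setSplitSentences_alt split message
instance (split : Int) (message : String) (out : List (Int × String)) : Decidable (Spec_setSplitSentences split message out) := by unfold Spec_setSplitSentences; infer_instance

-- ===== CLAIM (what is proved, stated in full; the proofs are below) =====
def Claim_equal_setSplitSentences : Prop := ∀ (split : Int) (message : String), Dom_setSplitSentences split message → Pre_setSplitSentences split message → Spec_setSplitSentences split message (setSplitSentences split message)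

-- ===== LEMMAS AND PROOFS =====

-- the assoc list [(j, f j) | j in range(0, s)], the common shape of both dicts
def pvRM (s : Int) (f : Int → String) : List (Int × String) :=
  (PySem.List.pyRange 0 s 1).map (fun j => (j, f j))

-- the characters A's loop appends to bucket j, mirroring pvLoopA's recursion
def pvAcc (cs : List Char) (split : Int) : Nat → Int → Int → String
  | 0, _, _ => ""
  | fuel + 1, i, j =>
    if i < (cs.length : Int) then
      (match PySem.List.pyGet? cs (i + j) with
       | some c => String.singleton c
       | none => "") ++ pvAcc cs split fuel (i + split) j
    else ""

-- the bucket update one outer iteration performs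
def pvUpd (cs : List Char) (f : Int → String) (i j : Int) : String :=
  match PySem.List.pyGet? cs (i + j) with
  | some c => (f j).push c
  | none => f j

theorem pvOfList_cons (c : Char) (l : List Char) :
    String.ofList (c :: l) = String.singleton c ++ String.ofList l :=
  String.toList_inj.mp (by simp)

theorem pvOfList_nil : String.ofList ([] : List Char) = "" :=
  String.toList_inj.mp (by simp)

theorem pvRM_mk_get? (s : Int) (f : Int → String) (j : Int) (h0 : 0 ≤ j) (hs : j < s) :
    (PySem.Dict.mk (pvRM s f)).get? j = some (f j) := by
  apply PySem.Dict.get?_of_mem_items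
  · exact List.mem_map.mpr ⟨j, PySem.List.mem_pyRange_one.mpr ⟨h0, hs⟩, rfl⟩
  · rw [PySem.Dict.keys_mk]
    unfold pvRM
    rw [List.map_map]
    simpa [Function.comp_def] using PySem.List.nodup_pyRange_one 0 s

theorem pvRM_mk_contains (s : Int) (f : Int → String) (j : Int) (h0 : 0 ≤ j) (hs : j < s) :
    (PySem.Dict.mk (pvRM s f)).contains j = true := by
  rw [PySem.Dict.contains_eq_isSome_get?, pvRM_mk_get? s f j h0 hs]
  rfl

theorem pvRM_congr (s : Int) (f g : Int → String)
    (h : ∀ j, 0 ≤ j → j < s → f j = g j) : pvRM s f = pvRM s g := by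
  unfold pvRM
  apply List.map_congr_left
  intro j hj
  rw [PySem.List.mem_pyRange_one] at hj
  rw [h j hj.1 hj.2]

theorem pvBodyA_fold (cs : List Char) (s i : Int) (hi : 0 ≤ i) (m : Nat) :
    ∀ (a : Int) (f : Int → String), 0 ≤ a → (s - a).toNat = m →
      ((PySem.List.pyRange a s 1).foldl (fun d j =>
        if i + j < (cs.length : Int) then
          match d.get? j, PySem.List.pyGet? cs (i + j) with
          | some str, some c => d.insert j (str.push c)
          | _, _ => d
        else d) (PySem.Dict.mk (pvRM s f))).items
      = pvRM s (fun j => if a ≤ j then pvUpd cs f i j else f j) := by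
  induction m with
  | zero =>
    intro a f ha hm
    rw [PySem.List.pyRange_one_eq_nil (by omega)]
    simp only [List.foldl_nil]
    show pvRM s f = _
    apply pvRM_congr
    intro j hj0 hjs
    rw [if_neg (by omega)]
  | succ m ih =>
    intro a f ha hm
    have has : a < s := by omega
    rw [PySem.List.pyRange_one_cons has, List.foldl_cons]
    have hstep :
        (if i + a < (cs.length : Int) then
          match (PySem.Dict.mk (pvRM s f)).get? a, PySem.List.pyGet? cs (i + a) with
          | some str, some c => (PySem.Dict.mk (pvRM s f)).insert a (str.push c)
          | _, _ => (PySem.Dict.mk (pvRM s f))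
        else (PySem.Dict.mk (pvRM s f)))
        = PySem.Dict.mk (pvRM s (fun j => if j = a then pvUpd cs f i a else f j)) := by
      by_cases hlt : i + a < (cs.length : Int)
      · rw [if_pos hlt]
        have hget : PySem.List.pyGet? cs (i + a) = some cs[(i + a).toNat] :=
          PySem.List.pyGet?_eq_some_getElem cs (by omega) (by exact_mod_cast hlt)
        rw [pvRM_mk_get? s f a ha has, hget]
        apply PySem.Dict.ext
        rw [PySem.Dict.items_insert_of_contains _ _ (pvRM_mk_contains s f a ha has)]
        show (pvRM s f).map _ = pvRM s _
        unfold pvRM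
        rw [List.map_map]
        apply List.map_congr_left
        intro j hj
        rw [PySem.List.mem_pyRange_one] at hj
        by_cases hja : j = a
        · subst hja
          simp only [Function.comp_apply]
          simp [pvUpd, hget]
        · simp only [Function.comp_apply]
          simp [beq_iff_eq, hja]
      · rw [if_neg hlt]
        have hnone : PySem.List.pyGet? cs (i + a) = none := by
          rw [PySem.List.pyGet?_eq_none_iff]
          intro hr
          exact hlt hr.2
        congr 1
        apply pvRM_congr
        intro j hj0 hjs
        beta_reduce
        by_cases hja : j = a
        · subst hja
          rw [if_pos rfl]
          unfold pvUpd
          rw [hnone]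
        · rw [if_neg hja]
    rw [hstep, ih (a + 1) _ (by omega) (by omega)]
    apply pvRM_congr
    intro j hj0 hjs
    beta_reduce
    by_cases hja : j = a
    · subst hja
      rw [if_neg (by omega), if_pos rfl, if_pos (by omega)]
    · by_cases haj : a + 1 ≤ j
      · rw [if_pos haj, if_pos (by omega)]
        unfold pvUpd
        beta_reduce
        rw [if_neg hja]
      · rw [if_neg haj, if_neg hja, if_neg (by omega)]

theorem pvBodyA_items (cs : List Char) (s i : Int) (hi : 0 ≤ i) (f : Int → String) :
    (pvBodyA cs s i (PySem.Dict.mk (pvRM s f))).items = pvRM s (pvUpd cs f i) := by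
  unfold pvBodyA
  rw [pvBodyA_fold cs s i hi (s - 0).toNat 0 f le_rfl rfl]
  apply pvRM_congr
  intro j hj0 hjs
  beta_reduce
  rw [if_pos hj0]

theorem pvUpd_append (cs : List Char) (f : Int → String) (i j : Int) :
    pvUpd cs f i j = f j ++ (match PySem.List.pyGet? cs (i + j) with
      | some c => String.singleton c
      | none => "") := by
  unfold pvUpd
  cases PySem.List.pyGet? cs (i + j) with
  | none => rw [String.append_empty]
  | some c => exact String.push_eq_append c

theorem pvLoopA_items (cs : List Char) (s : Int) (hs : 1 ≤ s) (fuel : Nat) :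
    ∀ (i : Int), 0 ≤ i → ∀ f : Int → String,
      (pvLoopA cs s fuel i (PySem.Dict.mk (pvRM s f))).items
        = pvRM s (fun j => f j ++ pvAcc cs s fuel i j) := by
  induction fuel with
  | zero =>
    intro i hi f
    show pvRM s f = _
    apply pvRM_congr
    intro j _ _
    show f j = f j ++ pvAcc cs s 0 i j
    show f j = f j ++ ""
    rw [String.append_empty]
  | succ fuel ih =>
    intro i hi f
    have hdef : pvLoopA cs s (fuel + 1) i (PySem.Dict.mk (pvRM s f))
        = if i < (cs.length : Int) then
            pvLoopA cs s fuel (i + s) (pvBodyA cs s i (PySem.Dict.mk (pvRM s f)))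
          else PySem.Dict.mk (pvRM s f) := rfl
    rw [hdef]
    by_cases hlt : i < (cs.length : Int)
    · rw [if_pos hlt]
      have hbody : pvBodyA cs s i (PySem.Dict.mk (pvRM s f))
          = PySem.Dict.mk (pvRM s (pvUpd cs f i)) :=
        PySem.Dict.ext (pvBodyA_items cs s i hi f)
      rw [hbody, ih (i + s) (by omega) (pvUpd cs f i)]
      apply pvRM_congr
      intro j _ _
      show pvUpd cs f i j ++ pvAcc cs s fuel (i + s) j = f j ++ pvAcc cs s (fuel + 1) i j
      rw [pvUpd_append]
      show _ = f j ++ (if i < (cs.length : Int) then _ else "")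
      rw [if_pos hlt, String.append_assoc]
    · rw [if_neg hlt]
      show pvRM s f = _
      apply pvRM_congr
      intro j _ _
      show f j = f j ++ pvAcc cs s (fuel + 1) i j
      show f j = f j ++ (if i < (cs.length : Int) then _ else "")
      rw [if_neg hlt, String.append_empty]

-- pvAcc as a filterMap over the visited positions
theorem pvAcc_eq_filterMap (cs : List Char) (s : Int) (hs : 1 ≤ s) (fuel : Nat) :
    ∀ (i j : Int), 0 ≤ i → 0 ≤ j → (cs.length : Int) ≤ i + s * fuel →
      pvAcc cs s fuel i j
        = String.ofList ((List.range fuel).filterMap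
            (fun (k : Nat) => cs[(i + j + s * (k : Int)).toNat]?)) := by
  induction fuel with
  | zero =>
    intro i j hi hj hn
    show "" = _
    rw [List.range_zero, List.filterMap_nil, pvOfList_nil]
  | succ fuel ih =>
    intro i j hi hj hn
    show (if i < (cs.length : Int) then _ else "") = _
    by_cases hlt : i < (cs.length : Int)
    · rw [if_pos hlt]
      have hrange : List.range (fuel + 1) = 0 :: (List.range fuel).map (fun x => 1 + x) := by
        rw [Nat.add_comm fuel 1, List.range_add]
        rfl
      rw [hrange, List.filterMap_cons]
      have hidx : PySem.List.pyGet? cs (i + j) = cs[(i + j).toNat]? :=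
        PySem.List.pyGet?_of_nonneg cs (by omega)
      have hrec : pvAcc cs s fuel (i + s) j
          = String.ofList ((List.range fuel).filterMap
              (fun (k : Nat) => cs[(i + s + j + s * (k : Int)).toNat]?)) := by
        apply ih (i + s) j (by omega) hj
        have hc : i + s * (((fuel : Nat) + 1 : Nat) : Int) = i + s + s * ((fuel : Nat) : Int) := by
          push_cast
          ring
        rw [hc] at hn
        exact hn
      have hmap : (List.filterMap (fun (k : Nat) => cs[(i + j + s * (k : Int)).toNat]?)
            ((List.range fuel).map (fun x => 1 + x)))
          = (List.range fuel).filterMap (fun (k : Nat) => cs[(i + s + j + s * (k : Int)).toNat]?) := by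
        rw [List.filterMap_map]
        apply List.filterMap_congr
        intro k _
        show cs[(i + j + s * ((1 + k : Nat) : Int)).toNat]? = _
        congr 2
        push_cast
        ring
      rw [hmap, hidx]
      simp only [Nat.cast_zero, mul_zero, add_zero]
      cases hc : cs[(i + j).toNat]? with
      | none =>
        show ("" : String) ++ _ = _
        rw [String.empty_append, hrec]
      | some c =>
        show String.singleton c ++ _ = _
        rw [pvOfList_cons, hrec]
    · rw [if_neg hlt]
      have hall : ∀ k ∈ List.range (fuel + 1),
          (fun (k : Nat) => cs[(i + j + s * (k : Int)).toNat]?) k = none := by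
        intro k _
        apply List.getElem?_eq_none
        have hk : (0 : Int) ≤ s * (k : Int) := mul_nonneg (by omega) (by positivity)
        have h1 : (cs.length : Int) ≤ i + j + s * (k : Int) := by linarith
        generalize i + j + s * ((k : Nat) : Int) = t at h1
        omega
      rw [List.filterMap_eq_nil_iff.mpr hall, pvOfList_nil]

-- padding: extending the index range over all-none positions does not change a filterMap
theorem pvFilterMap_pad {α : Type} (g : Nat → Option α) (N M : Nat) (hNM : N ≤ M)
    (h : ∀ k, N ≤ k → g k = none) :
    (List.range N).filterMap g = (List.range M).filterMap g := by
  have hM : M = N + (M - N) := by omega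
  rw [hM, List.range_add, List.filterMap_append]
  have hnil : ((List.range (M - N)).map (fun x => N + x)).filterMap g = [] := by
    rw [List.filterMap_eq_nil_iff]
    intro a ha
    obtain ⟨k, _, rfl⟩ := List.mem_map.mp ha
    exact h _ (Nat.le_add_right N k)
  rw [hnil, List.append_nil]

theorem pvSliceIdx (n : Nat) (j s : Int) (hs : 1 ≤ s) (hj : 0 ≤ j) :
    PySem.List.sliceIndices n (some j) none s = (min j n, (n : Int), s) := by
  have h1 : ¬ s < 0 := by omega
  have h2 : ¬ j < 0 := by omega
  simp [PySem.List.sliceIndices, h1, h2]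

-- B's strided slice message[j::s] produces exactly the characters A appends to bucket j
theorem pvSlice_eq_acc (cs : List Char) (s j : Int) (hs : 1 ≤ s) (h0 : 0 ≤ j) :
    (Option.map String.ofList (PySem.List.slice? cs (some j) none s)).getD ""
      = pvAcc cs s cs.length 0 j := by
  have hn0 : (0 : Int) ≤ (cs.length : Int) := by positivity
  have hlen : (cs.length : Int) ≤ 0 + s * (cs.length : Int) := by
    nlinarith [mul_nonneg (by omega : (0:Int) ≤ s - 1) hn0]
  rw [pvAcc_eq_filterMap cs s hs cs.length 0 j le_rfl h0 hlen]
  simp only [zero_add]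
  unfold PySem.List.slice?
  rw [if_neg (by omega : ¬ s = 0), pvSliceIdx cs.length j s hs h0]
  show (Option.map String.ofList (some _)).getD "" = _
  rw [Option.map_some, Option.getD_some]
  congr 1
  rw [if_pos (by omega : (0:Int) < s)]
  by_cases hjn : j ≤ (cs.length : Int)
  · rw [min_eq_left hjn]
    by_cases hje : j < (cs.length : Int)
    · rw [if_pos hje]
      set a : Int := (cs.length : Int) - j + s - 1 with ha
      set c : Int := a / s with hc
      have hdm : s * c + a % s = a := Int.mul_ediv_add_emod a s
      have hr1 : 0 ≤ a % s := Int.emod_nonneg a (by omega)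
      have hr2 : a % s < s := Int.emod_lt_of_pos a (by omega)
      have hcn : 0 ≤ c := Int.ediv_nonneg (by omega) (by omega)
      have hceil : (cs.length : Int) - j ≤ s * c := by linarith
      have hcle : c ≤ (cs.length : Int) := by
        by_contra hcon
        rw [not_le] at hcon
        have hm1 : (cs.length : Int) - j + 1 ≤ c := by omega
        have hm2 : s * ((cs.length : Int) - j + 1) ≤ s * c :=
          mul_le_mul_of_nonneg_left hm1 (by omega)
        have hm3 : ((cs.length : Int) - j) + s ≤ s * (((cs.length : Int) - j) + 1) := by
          nlinarith [mul_nonneg (by omega : (0:Int) ≤ s - 1) (by omega : (0:Int) ≤ (cs.length : Int) - j)]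
        linarith
      apply pvFilterMap_pad _ c.toNat cs.length
          (by
            have h := Int.toNat_le_toNat hcle
            simpa using h)
      intro k hk
      apply List.getElem?_eq_none
      have hkc : c ≤ (k : Int) := by
        have h := Int.toNat_of_nonneg hcn
        omega
      have hks : s * c ≤ s * (k : Int) := mul_le_mul_of_nonneg_left hkc (by omega)
      have h1 : (cs.length : Int) ≤ j + s * (k : Int) := by linarith
      generalize j + s * ((k : Nat) : Int) = t at h1
      omega
    · rw [if_neg hje]
      apply pvFilterMap_pad _ 0 cs.length (Nat.zero_le _)
      intro k _
      apply List.getElem?_eq_none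
      have hk : (0 : Int) ≤ s * (k : Int) := mul_nonneg (by omega) (by positivity)
      have h1 : (cs.length : Int) ≤ j + s * (k : Int) := by omega
      generalize j + s * ((k : Nat) : Int) = t at h1
      omega
  · rw [not_le] at hjn
    rw [min_eq_right (by omega : (cs.length : Int) ≤ j),
        if_neg (by omega : ¬ (cs.length : Int) < (cs.length : Int))]
    rw [List.range_zero, List.filterMap_nil]
    symm
    rw [List.filterMap_eq_nil_iff]
    intro k _
    apply List.getElem?_eq_none
    have hk : (0 : Int) ≤ s * (k : Int) := mul_nonneg (by omega) (by positivity)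
    have h1 : (cs.length : Int) ≤ j + s * (k : Int) := by omega
    generalize j + s * ((k : Nat) : Int) = t at h1
    omega

theorem pvInit_eq (s : Int) :
    ((PySem.List.pyRange 0 s 1).foldl
        (fun (d : PySem.Dict Int String) i => d.insert i "") PySem.Dict.empty)
      = PySem.Dict.mk (pvRM s (fun _ => "")) := by
  apply PySem.Dict.ext
  have h := PySem.Dict.items_foldl_insert_fresh (PySem.List.pyRange 0 s 1)
      (fun j => j) (fun _ => "") PySem.Dict.empty
      (fun a _ => PySem.Dict.contains_empty a)
      (by simpa using PySem.List.nodup_pyRange_one 0 s)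
  simpa [pvRM] using h

theorem pvAlt_items (split : Int) (message : String) :
    setSplitSentences_alt split message
      = pvRM split (fun j => (PySem.Str.slice? message (some j) none split).getD "") := by
  unfold setSplitSentences_alt
  have h := PySem.Dict.items_foldl_insert_fresh (PySem.List.pyRange 0 split 1)
      (fun j => j)
      (fun j => (PySem.Str.slice? message (some j) none split).getD "")
      PySem.Dict.empty
      (fun a _ => PySem.Dict.contains_empty a)
      (by simpa using PySem.List.nodup_pyRange_one 0 split)
  simpa [pvRM] using h

theorem pvMain (split : Int) (message : String) (hs : 1 ≤ split) :
    setSplitSentences split message = setSplitSentences_alt split message := by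
  unfold setSplitSentences
  rw [pvAlt_items]
  simp only
  rw [pvInit_eq, pvLoopA_items message.toList split hs message.toList.length 0 le_rfl]
  apply pvRM_congr
  intro j hj0 hjs
  show ("" : String) ++ _ = _
  rw [String.empty_append]
  simp only [PySem.Str.slice?, PySem.Chars.slice?_eq_listSlice?]
  exact (pvSlice_eq_acc message.toList split j hs hj0).symm

-- ===== VERDICT (by name: the statement is the Claim_ definition above) =====
theorem setSplitSentences_spec : Claim_equal_setSplitSentences := by
  intro split message _ hpre
  show setSplitSentences split message = setSplitSentences_alt split message
  rcases hpre with hs | hempty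
  · exact pvMain split message hs
  · by_cases hs : 1 ≤ split
    · exact pvMain split message hs
    · subst hempty
      unfold setSplitSentences setSplitSentences_alt
      rw [PySem.List.pyRange_one_eq_nil (by omega)]
      rfl
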